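-- pv_equiv track=rewrite | github.com/anton-musrevinu/logical_interpretation_of_autoencoders | src/wmisdd/wmisddsrc/methods/IntegrationEssentials.py | complete_bool_intervals
-- ===== SOURCE A (Python) =====
-- import itertools
--
-- def complete_bool_intervals(intervalsBool):
-- 	#numIntervals = sum([len(x) for x in intervalsBool])
-- 	fullTable = itertools.product([False, True], repeat=len(intervalsBool))
-- 	actualBoolIntervlas = []
-- 	for row in fullTable:
-- 		skip = False
-- 		for i,elem in enumerate(row):
-- 			if not elem in intervalsBool[i]:
-- 				skip = True
-- 				break
-- 		if skip == True:
-- 			continue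
-- 		actualBoolIntervlas.append(tuple(row))
--
-- 	return actualBoolIntervlas
-- ===== SOURCE B (Python) =====
-- import itertools
--
-- def complete_bool_intervals(intervalsBool):
--     choices = [[v for v in (False, True) if v in interval] for interval in intervalsBool]
--     return [tuple(row) for row in itertools.product(*choices)]
-- ===== Notes on version B (the rewrite author's own statement) =====
-- stated objective: alternative
-- what changed: B takes the Cartesian product over only the allowed values of each position instead of enumerating all 2^n boolean tuples and filtering each one; measured 3.8x at n=256 but unconfirmed at the largest size (output size dominates there).
import Mathlib
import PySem

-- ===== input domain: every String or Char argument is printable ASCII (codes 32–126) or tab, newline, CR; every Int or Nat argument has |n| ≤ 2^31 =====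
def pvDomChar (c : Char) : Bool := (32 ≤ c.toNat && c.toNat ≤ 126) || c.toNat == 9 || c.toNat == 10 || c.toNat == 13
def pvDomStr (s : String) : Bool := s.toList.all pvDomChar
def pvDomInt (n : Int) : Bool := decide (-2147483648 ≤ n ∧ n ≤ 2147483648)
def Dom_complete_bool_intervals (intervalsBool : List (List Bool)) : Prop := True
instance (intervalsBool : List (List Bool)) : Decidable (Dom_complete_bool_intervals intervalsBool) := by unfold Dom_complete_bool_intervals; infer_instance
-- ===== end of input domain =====

-- B enumerates the Cartesian product of the per-position allowed values instead of filtering all 2^n tuples.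

-- ===== PORT A =====
-- itertools.product([False, True], repeat=n): leftmost position varies slowest
def pvFullTable : Nat → List (List Bool)
  | 0 => [[]]
  | n + 1 => [false, true].flatMap (fun b => (pvFullTable n).map (fun row => b :: row))

-- the inner 'for i,elem in enumerate(row)' loop with break: true = not skipped.
-- intervalsBool[i]: i is always < intervalsBool.length here, so getD never hits its default.
def pvRowOk (ivs : List (List Bool)) (i : Nat) : List Bool → Bool
  | [] => true
  | elem :: rest => if (ivs.getD i []).contains elem then pvRowOk ivs (i + 1) rest else false

def complete_bool_intervals (intervalsBool : List (List Bool)) : List (List Bool) :=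
  let fullTable := pvFullTable intervalsBool.length
  fullTable.foldl (fun acc row => if pvRowOk intervalsBool 0 row then acc ++ [row] else acc) []

-- ===== PORT B =====
-- itertools.product(*choices)
def pvProd : List (List Bool) → List (List Bool)
  | [] => [[]]
  | c :: cs => c.flatMap (fun b => (pvProd cs).map (fun row => b :: row))

def complete_bool_intervals_alt (intervalsBool : List (List Bool)) : List (List Bool) :=
  let choices := intervalsBool.map (fun interval => [false, true].filter (fun v => interval.contains v))
  pvProd choices

-- ===== PRECONDITION & SPEC =====
def Spec_complete_bool_intervals (intervalsBool : List (List Bool)) (out : List (List Bool)) : Prop := out = complete_bool_intervals_alt intervalsBool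
instance (intervalsBool : List (List Bool)) (out : List (List Bool)) : Decidable (Spec_complete_bool_intervals intervalsBool out) := by unfold Spec_complete_bool_intervals; infer_instance

-- ===== CLAIM (what is proved, stated in full; the proofs are below) =====
def Claim_equal_complete_bool_intervals : Prop := ∀ (intervalsBool : List (List Bool)), Dom_complete_bool_intervals intervalsBool → Spec_complete_bool_intervals intervalsBool (complete_bool_intervals intervalsBool)

-- ===== LEMMAS AND PROOFS =====

theorem pv_foldl_append_if {α : Type} (p : α → Bool) :
    ∀ (l : List α) (acc : List α),
      l.foldl (fun acc row => if p row then acc ++ [row] else acc) acc = acc ++ l.filter p := by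
  intro l
  induction l with
  | nil => intro acc; simp
  | cons x xs ih =>
    intro acc
    by_cases h : p x <;> simp [List.foldl, h, ih, List.filter]

theorem pvRowOk_shift (iv : List Bool) (ivs : List (List Bool)) :
    ∀ (row : List Bool) (i : Nat), pvRowOk (iv :: ivs) (i + 1) row = pvRowOk ivs i row := by
  intro row
  induction row with
  | nil => intro i; rfl
  | cons e rest ih => intro i; simp [pvRowOk, ih]

theorem pv_main : ∀ (ivs : List (List Bool)),
    (pvFullTable ivs.length).filter (pvRowOk ivs 0)
      = pvProd (ivs.map (fun interval => [false, true].filter (fun v => interval.contains v))) := by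
  intro ivs
  induction ivs with
  | nil => simp [pvFullTable, pvProd, pvRowOk, List.filter]
  | cons iv rest ih =>
    have hcons : ∀ (b : Bool) (row : List Bool),
        pvRowOk (iv :: rest) 0 (b :: row) = (iv.contains b && pvRowOk rest 0 row) := by
      intro b row
      simp [pvRowOk, pvRowOk_shift]
    have hfilt : ∀ b : Bool,
        (pvFullTable rest.length).filter (fun row => pvRowOk (iv :: rest) 0 (b :: row))
          = if iv.contains b then (pvFullTable rest.length).filter (pvRowOk rest 0) else [] := by
      intro b
      simp only [hcons, List.contains_eq_mem]
      by_cases h : b ∈ iv <;> simp [h]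
    simp only [List.length_cons, pvFullTable, pvProd, List.map_cons]
    by_cases hf : iv.contains false <;> by_cases ht : iv.contains true <;>
      simp_all [List.flatMap, List.filter_append, List.filter_map, Function.comp_def,
        List.contains_eq_mem]

-- ===== VERDICT (by name: the statement is the Claim_ definition above) =====
theorem complete_bool_intervals_spec : Claim_equal_complete_bool_intervals := by
  intro ivs _
  unfold Spec_complete_bool_intervals complete_bool_intervals complete_bool_intervals_alt
  simp only []
  rw [pv_foldl_append_if, List.nil_append, pv_main]
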